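-- pv_equiv track=rewrite | github.com/rapidsai/cudf | python/custreamz/custreamz/deployment/custreamz_local/produce_random_to_kafka.py | column_names
-- ===== SOURCE A (Python) =====
-- import math
--
-- def column_names(size):
--     base_cols = ["AppId{}", "PlayTime{}", "timestamp{}"]
--     cols = []
--     mult = math.ceil(size/len(base_cols))
--     for i in range(mult):
--         for c in base_cols:
--             cols.append(c.format(i))
--             if(len(cols) == size): break
--     return cols
-- ===== SOURCE B (Python) =====
-- def column_names(size):
--     base_cols = ["AppId{}", "PlayTime{}", "timestamp{}"]
--     return [base_cols[i % 3].format(i // 3) for i in range(size)]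
-- ===== Notes on version B (the rewrite author's own statement) =====
-- stated objective: idiomatic
-- what changed: Replaces the nested outer-multiplier loop with inner template loop and early break by a single flat comprehension over range(size) that computes each name directly via quotient/remainder indexing.
import Mathlib
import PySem

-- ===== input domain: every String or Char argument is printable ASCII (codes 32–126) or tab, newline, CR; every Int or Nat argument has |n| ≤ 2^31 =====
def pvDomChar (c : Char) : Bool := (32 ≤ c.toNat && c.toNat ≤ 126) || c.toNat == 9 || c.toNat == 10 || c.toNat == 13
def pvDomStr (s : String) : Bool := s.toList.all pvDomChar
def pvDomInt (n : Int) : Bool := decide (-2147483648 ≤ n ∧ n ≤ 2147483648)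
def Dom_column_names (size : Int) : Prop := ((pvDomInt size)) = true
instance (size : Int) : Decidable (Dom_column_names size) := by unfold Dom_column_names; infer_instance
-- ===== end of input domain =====

-- B replaces A's nested loops (outer ceil-multiplier loop, inner template loop with early break)
-- by a single flat map over range(size) using quotient/remainder indexing; same output, idiomatic.

-- ===== PORT A =====
-- inner 'for c in base_cols: cols.append(c.format(i)); if len(cols)==size: break'
def cnInner (size i : Int) : List String → List String → List String
  | cols, [] => cols
  | cols, c :: rest =>
    let cols' := cols ++ [PySem.Str.replace c "{}" (PySem.Int.toStr i)]
    if (cols'.length : Int) = size then cols' else cnInner size i cols' rest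

-- math.ceil(size/3) ported as floor((size+2)/3); exact here: |size| ≤ 2^31 keeps the
-- float division size/3 far from the wrong side of an integer, so ceil is exact on Dom
def column_names (size : Int) : List String :=
  (PySem.List.pyRange 0 (PySem.Int.floordiv (size + 2) 3) 1).foldl
    (fun cols i => cnInner size i cols ["AppId{}", "PlayTime{}", "timestamp{}"]) []

-- ===== PORT B =====
def column_names_alt (size : Int) : List String :=
  (PySem.List.pyRange 0 size 1).map (fun i =>
    PySem.Str.replace
      (PySem.List.pyGetD ["AppId{}", "PlayTime{}", "timestamp{}"] (PySem.Int.mod i 3) "") "{}"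
      (PySem.Int.toStr (PySem.Int.floordiv i 3)))

-- ===== PRECONDITION & SPEC =====
def Spec_column_names (size : Int) (out : List String) : Prop := out = column_names_alt size
instance (size : Int) (out : List String) : Decidable (Spec_column_names size out) := by unfold Spec_column_names; infer_instance

-- ===== CLAIM (what is proved, stated in full; the proofs are below) =====
def Claim_equal_column_names : Prop := ∀ (size : Int), Dom_column_names size → Spec_column_names size (column_names size)

-- ===== LEMMAS AND PROOFS =====

-- the j-th name produced (Nat index)
def gN (j : Nat) : String :=
  PySem.Str.replace ((["AppId{}", "PlayTime{}", "timestamp{}"]).getD (j % 3) "") "{}"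
    (PySem.Int.toStr ((j / 3 : Nat) : Int))

lemma cnInner_eq (n k : Nat) (h : 3 * k < n) :
    cnInner (n : Int) (k : Int) ((List.range (3 * k)).map gN)
        ["AppId{}", "PlayTime{}", "timestamp{}"]
      = (List.range (min (3 * k + 3) n)).map gN := by
  have h0 : gN (3 * k) = PySem.Str.replace "AppId{}" "{}" (PySem.Int.toStr (k : Int)) := by
    have : 3 * k % 3 = 0 := by omega
    have h2 : 3 * k / 3 = k := by omega
    simp [gN, this, h2]
  have h1 : gN (3 * k + 1) = PySem.Str.replace "PlayTime{}" "{}" (PySem.Int.toStr (k : Int)) := by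
    have : (3 * k + 1) % 3 = 1 := by omega
    have h2 : (3 * k + 1) / 3 = k := by omega
    simp [gN, this, h2]
  have h2 : gN (3 * k + 2) = PySem.Str.replace "timestamp{}" "{}" (PySem.Int.toStr (k : Int)) := by
    have : (3 * k + 2) % 3 = 2 := by omega
    have h3 : (3 * k + 2) / 3 = k := by omega
    simp [gN, this, h3]
  have hrange : (List.range (3 * k + 3)).map gN
      = (List.range (3 * k)).map gN ++ [gN (3 * k)] ++ [gN (3 * k + 1)] ++ [gN (3 * k + 2)] := by
    rw [show 3 * k + 3 = (3 * k + 2) + 1 from rfl, List.range_succ,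
        show 3 * k + 2 = (3 * k + 1) + 1 from rfl, List.range_succ, List.range_succ]
    simp
  simp only [cnInner, List.length_append, List.length_map, List.length_range, List.length_cons,
    List.length_nil]
  split_ifs with c1 c2 c3
  · rw [show min (3 * k + 3) n = 3 * k + 1 from by omega, List.range_succ, List.map_append]
    simp [h0]
  · rw [show min (3 * k + 3) n = 3 * k + 2 from by omega,
      show 3 * k + 2 = (3 * k + 1) + 1 from rfl, List.range_succ,
      show 3 * k + 1 = (3 * k) + 1 from rfl, List.range_succ]
    simp [h0, h1]
  · rw [show min (3 * k + 3) n = 3 * k + 3 from by omega, hrange]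
    simp [h0, h1, h2]
  · rw [show min (3 * k + 3) n = 3 * k + 3 from by omega, hrange]
    simp [h0, h1, h2]

lemma outer_eq (n : Nat) : ∀ k : Nat, 3 * k ≤ n + 2 →
    (PySem.List.pyRange 0 (k : Int) 1).foldl
        (fun cols i => cnInner (n : Int) i cols ["AppId{}", "PlayTime{}", "timestamp{}"]) []
      = (List.range (min (3 * k) n)).map gN := by
  intro k
  induction k with
  | zero => intro _; simp [PySem.List.pyRange_one_eq_nil]
  | succ k ih =>
    intro hk
    have hk' : 3 * k ≤ n + 2 := by omega
    have hsplit : PySem.List.pyRange 0 ((k + 1 : Nat) : Int) 1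
        = PySem.List.pyRange 0 (k : Int) 1 ++ [(k : Int)] := by
      have : ((k + 1 : Nat) : Int) = (k : Int) + 1 := by push_cast; ring
      rw [this, PySem.List.pyRange_one_succ_right (by positivity)]
    rw [hsplit, List.foldl_append, ih hk']
    simp only [List.foldl_cons, List.foldl_nil]
    have h3k : 3 * k < n := by omega
    have hmin : min (3 * k) n = 3 * k := by omega
    rw [hmin, cnInner_eq n k h3k]
    have : 3 * (k + 1) = 3 * k + 3 := by ring
    rw [this]

-- ===== VERDICT (by name: the statement is the Claim_ definition above) =====
theorem column_names_spec : Claim_equal_column_names := by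
  intro size _
  unfold Spec_column_names column_names column_names_alt
  by_cases hs : size ≤ 0
  · have hA : PySem.Int.floordiv (size + 2) 3 ≤ 0 := by
      have := (PySem.Int.floordiv_lt_iff_lt_mul (a := size + 2) (b := 3) (q := 1) (by omega)).mpr
        (by omega)
      omega
    rw [PySem.List.pyRange_one_eq_nil (by omega), PySem.List.pyRange_one_eq_nil (by omega)]
    simp
  · obtain ⟨n, hn⟩ : ∃ n : Nat, size = (n : Int) :=
      ⟨size.toNat, (Int.toNat_of_nonneg (by omega)).symm⟩
    subst hn
    have hmult : PySem.Int.floordiv ((n : Int) + 2) 3 = (((n + 2) / 3 : Nat) : Int) := by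
      have := PySem.Int.floordiv_natCast (n + 2) 3
      push_cast at this ⊢
      exact this
    rw [hmult, outer_eq n ((n + 2) / 3) (by omega)]
    have hmin : min (3 * ((n + 2) / 3)) n = n := by omega
    rw [hmin]
    rw [PySem.List.pyRange_one]
    simp only [sub_zero, Int.toNat_natCast, zero_add, List.map_map]
    apply List.map_congr_left
    intro j _
    rw [Function.comp_apply]
    have hm : PySem.Int.mod (j : Int) 3 = ((j % 3 : Nat) : Int) := by
      simpa using PySem.Int.mod_natCast j 3
    have hd : PySem.Int.floordiv (j : Int) 3 = ((j / 3 : Nat) : Int) := by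
      simpa using PySem.Int.floordiv_natCast j 3
    simp only [hm, hd, PySem.List.pyGetD_natCast, gN]
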